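-- pv_equiv track=rewrite | github.com/KalleFruitema/advent-of-code | 2024/day_02/part_2.py | check
-- ===== SOURCE A (Python) =====
-- def check(report: list[int]):
--     greater = True
--     lesser = True
--     wrong = False
--     for i in range(1, len(report)):
--         if greater and report[i] > report[i - 1] and 1 <= abs(report[i] - report[i - 1]) <= 3:
--             lesser = False
--         elif lesser and report[i] < report[i - 1] and 1 <= abs(report[i] - report[i - 1]) <= 3:
--             greater = False
--         else:
--             wrong = True
--
--     return wrong
-- ===== SOURCE B (Python) =====
-- def check(report: list[int]):
--     diffs = [b - a for a, b in zip(report, report[1:])]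
--     return not (all(1 <= d <= 3 for d in diffs)
--                 or all(-3 <= d <= -1 for d in diffs))
-- ===== Notes on version B (the rewrite author's own statement) =====
-- stated objective: simpler
-- what changed: Replaced the three-flag single-pass state machine over indices by computing the list of consecutive differences and testing two whole-list predicates (all diffs in [1,3] or all in [-3,-1]), returning the negation.
import Mathlib
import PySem

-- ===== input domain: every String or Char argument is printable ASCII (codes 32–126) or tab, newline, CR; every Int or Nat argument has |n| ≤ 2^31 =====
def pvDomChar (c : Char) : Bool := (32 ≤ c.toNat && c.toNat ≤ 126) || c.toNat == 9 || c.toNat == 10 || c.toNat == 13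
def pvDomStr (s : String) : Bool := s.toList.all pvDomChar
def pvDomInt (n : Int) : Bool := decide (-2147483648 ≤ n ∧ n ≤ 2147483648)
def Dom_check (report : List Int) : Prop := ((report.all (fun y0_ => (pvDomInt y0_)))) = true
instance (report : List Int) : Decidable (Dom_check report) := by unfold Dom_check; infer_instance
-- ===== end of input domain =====

-- B replaces A's three-flag index state machine by a list of consecutive differences and two whole-list predicates (simpler decomposition, same O(n) cost).

-- ===== PORT A =====
-- literal port of A's index loop; report[i] / report[i-1] always in range for i ∈ range(1, len), so pyGetD is exact here
def check (report : List Int) : Bool :=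
  let st := (PySem.List.pyRange 1 (report.length : Int) 1).foldl
    (fun (st : Bool × Bool × Bool) i =>
      let (greater, lesser, wrong) := st
      let ri := PySem.List.pyGetD report i 0
      let rp := PySem.List.pyGetD report (i - 1) 0
      if greater ∧ rp < ri ∧ 1 ≤ |ri - rp| ∧ |ri - rp| ≤ 3 then
        (greater, false, wrong)
      else if lesser ∧ ri < rp ∧ 1 ≤ |ri - rp| ∧ |ri - rp| ≤ 3 then
        (false, lesser, wrong)
      else
        (greater, lesser, true))
    (true, true, false)
  st.2.2

-- ===== PORT B =====
def check_alt (report : List Int) : Bool :=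
  let diffs := (report.zip (PySem.List.slice report (some 1) none)).map (fun p => p.2 - p.1)
  !(diffs.all (fun d => decide (1 ≤ d ∧ d ≤ 3)) ||
    diffs.all (fun d => decide (-3 ≤ d ∧ d ≤ -1)))

-- ===== PRECONDITION & SPEC =====
def Spec_check (report : List Int) (out : Bool) : Prop := out = check_alt report
instance (report : List Int) (out : Bool) : Decidable (Spec_check report out) := by unfold Spec_check; infer_instance

-- ===== CLAIM (what is proved, stated in full; the proofs are below) =====
def Claim_equal_check : Prop := ∀ (report : List Int), Dom_check report → Spec_check report (check report)

-- ===== LEMMAS AND PROOFS =====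

-- the step of A as a function of the difference only
def stepD (st : Bool × Bool × Bool) (d : Int) : Bool × Bool × Bool :=
  let (greater, lesser, wrong) := st
  if greater ∧ 0 < d ∧ 1 ≤ |d| ∧ |d| ≤ 3 then (greater, false, wrong)
  else if lesser ∧ d < 0 ∧ 1 ≤ |d| ∧ |d| ≤ 3 then (false, lesser, wrong)
  else (greater, lesser, true)

-- the index list mapped to adjacent pairs is exactly zip with the tail
lemma map_pyRange_pairs (xs : List Int) :
    (PySem.List.pyRange 1 (xs.length : Int) 1).map
      (fun i => (PySem.List.pyGetD xs (i - 1) 0, PySem.List.pyGetD xs i 0))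
      = xs.zip xs.tail := by
  apply List.ext_getElem
  · simp [PySem.List.length_pyRange_one, List.length_zip, List.length_tail]
  · intro k h1 h2
    have hk : k < xs.length - 1 := by
      simpa [PySem.List.length_pyRange_one] using h1
    simp only [List.getElem_map, PySem.List.getElem_pyRange_one, List.getElem_zip,
      List.getElem_tail]
    have e1 : (1 : Int) + k - 1 = ((k : Nat) : Int) := by ring
    have e2 : (1 : Int) + k = (((k + 1 : Nat)) : Int) := by push_cast; ring
    rw [e1, e2, PySem.List.pyGetD_natCast, PySem.List.pyGetD_natCast]
    simp [List.getD_eq_getElem?_getD, List.getElem?_eq_getElem (by omega : k < xs.length),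
      List.getElem?_eq_getElem (by omega : k + 1 < xs.length)]

-- invariant of A's loop over the differences (every state A reaches has greater or lesser set)
lemma stepD_fold (ds : List Int) : ∀ g l w : Bool, (g || l) = true →
    (ds.foldl stepD (g, l, w)).2.2
      = (w || !((g && ds.all (fun d => decide (1 ≤ d ∧ d ≤ 3))) ||
                (l && ds.all (fun d => decide (-3 ≤ d ∧ d ≤ -1))))) := by
  induction ds with
  | nil => intro g l w hgl; cases g <;> cases l <;> simp_all
  | cons d t ih =>
    intro g l w hgl
    simp only [List.foldl_cons, List.all_cons, stepD]
    split_ifs with h1 h2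
    · obtain ⟨hg, hd, _, hb⟩ := h1
      rw [ih g false w (by simp [hg])]
      have hu : decide (1 ≤ d ∧ d ≤ 3) = true := by
        rw [abs_of_pos hd] at hb; simp; omega
      have hv : decide (-3 ≤ d ∧ d ≤ -1) = false := by simp; omega
      simp [hg, hu, hv]
    · obtain ⟨hl, hd, _, hb⟩ := h2
      rw [ih false l w (by simp [hl])]
      have hu : decide (1 ≤ d ∧ d ≤ 3) = false := by simp; omega
      have hv : decide (-3 ≤ d ∧ d ≤ -1) = true := by
        rw [abs_of_neg hd] at hb; simp; omega
      simp [hl, hu, hv]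
    · have hu : (g && decide (1 ≤ d ∧ d ≤ 3)) = false := by
        cases g with
        | false => rfl
        | true =>
          simp only [Bool.true_and, decide_eq_false_iff_not]
          intro h
          exact h1 ⟨rfl, by omega, by rw [abs_of_pos (by omega)]; omega⟩
      have hv : (l && decide (-3 ≤ d ∧ d ≤ -1)) = false := by
        cases l with
        | false => rfl
        | true =>
          simp only [Bool.true_and, decide_eq_false_iff_not]
          intro h
          exact h2 ⟨rfl, by omega, by rw [abs_of_neg (by omega)]; omega⟩
      rw [ih g l true hgl, ← Bool.and_assoc, ← Bool.and_assoc, hu, hv]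
      simp

-- A's per-index step equals stepD of the difference
lemma step_eq_stepD (st : Bool × Bool × Bool) (p : Int × Int) :
    (let (greater, lesser, wrong) := st
     if greater ∧ p.1 < p.2 ∧ 1 ≤ |p.2 - p.1| ∧ |p.2 - p.1| ≤ 3 then (greater, false, wrong)
     else if lesser ∧ p.2 < p.1 ∧ 1 ≤ |p.2 - p.1| ∧ |p.2 - p.1| ≤ 3 then (false, lesser, wrong)
     else (greater, lesser, true)) = stepD st (p.2 - p.1) := by
  obtain ⟨g, l, w⟩ := st
  simp only [stepD]
  have c1 : (g = true ∧ p.1 < p.2 ∧ 1 ≤ |p.2 - p.1| ∧ |p.2 - p.1| ≤ 3)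
      ↔ (g = true ∧ 0 < p.2 - p.1 ∧ 1 ≤ |p.2 - p.1| ∧ |p.2 - p.1| ≤ 3) := by
    constructor <;> rintro ⟨a, b, c⟩ <;> exact ⟨a, by omega, c⟩
  have c2 : (l = true ∧ p.2 < p.1 ∧ 1 ≤ |p.2 - p.1| ∧ |p.2 - p.1| ≤ 3)
      ↔ (l = true ∧ p.2 - p.1 < 0 ∧ 1 ≤ |p.2 - p.1| ∧ |p.2 - p.1| ≤ 3) := by
    constructor <;> rintro ⟨a, b, c⟩ <;> exact ⟨a, by omega, c⟩
  exact if_congr c1 rfl (if_congr c2 rfl rfl)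

-- ===== VERDICT (by name: the statement is the Claim_ definition above) =====
theorem check_spec : Claim_equal_check := by
  intro report _
  unfold Spec_check check check_alt
  rw [PySem.List.slice_from_one]
  have hfold :
      (PySem.List.pyRange 1 (report.length : Int) 1).foldl
        (fun (st : Bool × Bool × Bool) i =>
          let (greater, lesser, wrong) := st
          let ri := PySem.List.pyGetD report i 0
          let rp := PySem.List.pyGetD report (i - 1) 0
          if greater ∧ rp < ri ∧ 1 ≤ |ri - rp| ∧ |ri - rp| ≤ 3 then (greater, false, wrong)
          else if lesser ∧ ri < rp ∧ 1 ≤ |ri - rp| ∧ |ri - rp| ≤ 3 then (false, lesser, wrong)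
          else (greater, lesser, true))
        (true, true, false)
      = ((report.zip report.tail).map (fun p => p.2 - p.1)).foldl stepD (true, true, false) := by
    rw [← map_pyRange_pairs report, List.foldl_map, List.foldl_map]
    apply PySem.List.foldl_congr_mem
    intro st p _
    exact step_eq_stepD st (PySem.List.pyGetD report (p - 1) 0, PySem.List.pyGetD report p 0)
  simp only [hfold]
  rw [stepD_fold ((report.zip report.tail).map (fun p => p.2 - p.1)) true true false rfl]
  simp
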